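-- pv_equiv track=rewrite | github.com/zeth/greco | ledgrid.py | _trim_whitespace
-- ===== SOURCE A (Python) =====
-- def _trim_whitespace(char):  # For loading text assets only
--     """
--     Internal. Trims white space pixels from the front and back of loaded
--     text characters
--     """
--
--     psum = lambda x: sum(sum(x, []))
--     if psum(char) > 0:
--         is_empty = True
--         while is_empty:  # From front
--             row = char[0:8]
--             is_empty = psum(row) == 0
--             if is_empty:
--                 del char[0:8]
--         is_empty = True
--         while is_empty:  # From back
--             row = char[-8:]
--             is_empty = psum(row) == 0
--             if is_empty:
--                 del char[-8:]
--     return char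
-- ===== SOURCE B (Python) =====
-- def _trim_whitespace(char):  # For loading text assets only
--     """Trim zero-sum 8-row blocks from both ends (mutates char in place, like A)."""
--     rows = [sum(r) for r in char]
--     if sum(rows) <= 0:
--         return char
--     front = 0
--     while sum(rows[front * 8:front * 8 + 8]) == 0:
--         front += 1
--     del char[:front * 8]
--     rows = rows[front * 8:]
--     n = len(rows)
--     back = 0
--     while sum(rows[max(0, n - back * 8 - 8):n - back * 8]) == 0:
--         back += 1
--     del char[len(char) - back * 8:]
--     return char
-- ===== Notes on version B (the rewrite author's own statement) =====
-- stated objective: faster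
-- what changed: A repeatedly deletes one 8-row block at a time from the front and then the back, re-summing by Python's list-concatenating sum each time; B computes per-row sums in one pass, counts leading and trailing zero-sum 8-blocks over that table, and makes a single cut per side (same in-place mutation of char).
import Mathlib
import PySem

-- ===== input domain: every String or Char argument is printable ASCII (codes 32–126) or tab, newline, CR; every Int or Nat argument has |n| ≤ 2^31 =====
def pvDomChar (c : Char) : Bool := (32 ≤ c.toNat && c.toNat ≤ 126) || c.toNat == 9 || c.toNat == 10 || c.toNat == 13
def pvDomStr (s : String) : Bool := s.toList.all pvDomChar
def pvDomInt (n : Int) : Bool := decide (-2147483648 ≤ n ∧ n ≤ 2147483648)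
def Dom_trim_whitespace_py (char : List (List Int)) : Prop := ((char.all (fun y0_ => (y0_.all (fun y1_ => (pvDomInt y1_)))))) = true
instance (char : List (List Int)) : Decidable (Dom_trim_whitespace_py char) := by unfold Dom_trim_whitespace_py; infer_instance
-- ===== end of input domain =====

-- B replaces A's repeated one-block-at-a-time front/back deletions by a single pass of
-- row sums plus one cut per side (same in-place mutation of `char` in Python; the
-- equivalence proved here is about the returned value).

-- ===== PORT A =====

-- psum: Python's sum of rows with an empty-list start concatenates them (= flatten), then sum
def pvPsum (x : List (List Int)) : Int := x.flatten.sum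

-- the front `while is_empty` loop: delete char[0:8] while its psum is 0.
-- (the non-emptiness test is a totality guard only: Python diverges on an all-zero
-- remainder, which is unreachable because the loop is entered only when psum char > 0.)
def pvTrimFrontA (char : List (List Int)) : List (List Int) :=
  if char ≠ [] ∧ pvPsum (char.take 8) = 0 then pvTrimFrontA (char.drop 8)
  else char
termination_by char.length
decreasing_by
  rename_i h
  have : char.length ≠ 0 := by simpa using List.length_pos_of_ne_nil h.1 |>.ne'
  simp [List.length_drop]; omega

-- the back `while is_empty` loop: delete char[-8:] while its psum is 0 (same totality-guard note).
def pvTrimBackA (char : List (List Int)) : List (List Int) :=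
  if char ≠ [] ∧ pvPsum (char.drop (char.length - 8)) = 0 then
    pvTrimBackA (char.take (char.length - 8))
  else char
termination_by char.length
decreasing_by
  rename_i h
  have : char.length ≠ 0 := by simpa using List.length_pos_of_ne_nil h.1 |>.ne'
  simp [List.length_take]; omega

def trim_whitespace_py (char : List (List Int)) : List (List Int) :=
  if pvPsum char > 0 then pvTrimBackA (pvTrimFrontA char) else char

-- ===== PORT B =====

-- `while sum(rows[front*8:front*8+8]) == 0: front += 1`
-- (`front*8 < rows.length` is a totality guard for the same unreachable all-zero case.)
def pvCountFront (rows : List Int) (front : Nat) : Nat :=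
  if front * 8 < rows.length ∧ ((rows.drop (front * 8)).take 8).sum = 0 then
    pvCountFront rows (front + 1)
  else front
termination_by rows.length - front * 8
decreasing_by rename_i h; omega

-- `while sum(rows[max(0, n-back*8-8):n-back*8]) == 0: back += 1` (guard `back*8 < n` likewise)
def pvCountBack (rows : List Int) (n : Nat) (back : Nat) : Nat :=
  if back * 8 < n ∧ ((rows.take (n - back * 8)).drop (n - back * 8 - 8)).sum = 0 then
    pvCountBack rows n (back + 1)
  else back
termination_by n - back * 8
decreasing_by rename_i h; omega

def trim_whitespace_py_alt (char : List (List Int)) : List (List Int) :=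
  let rows := char.map List.sum
  if rows.sum ≤ 0 then char
  else
    let front := pvCountFront rows 0
    let char2 := char.drop (front * 8)          -- del char[:front*8]
    let rows2 := rows.drop (front * 8)
    let back := pvCountBack rows2 rows2.length 0
    char2.take (char2.length - back * 8)        -- del char[len(char)-back*8:]

-- ===== PRECONDITION & SPEC =====
def Spec_trim_whitespace_py (char : List (List Int)) (out : List (List Int)) : Prop := out = trim_whitespace_py_alt char
instance (char : List (List Int)) (out : List (List Int)) : Decidable (Spec_trim_whitespace_py char out) := by unfold Spec_trim_whitespace_py; infer_instance

-- ===== CLAIM (what is proved, stated in full; the proofs are below) =====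
def Claim_equal_trim_whitespace_py : Prop := ∀ (char : List (List Int)), Dom_trim_whitespace_py char → Spec_trim_whitespace_py char (trim_whitespace_py char)

-- ===== LEMMAS AND PROOFS =====

lemma pvPsum_eq_map_sum (x : List (List Int)) : pvPsum x = (x.map List.sum).sum := by
  simp [pvPsum, List.sum_flatten]

lemma pvCountFront_succ (rows : List Int) (f : Nat) :
    pvCountFront rows (f + 1) = pvCountFront (rows.drop 8) f + 1 := by
  conv_lhs => rw [pvCountFront]
  conv_rhs => rw [pvCountFront]
  have harg : 8 + f * 8 = (f + 1) * 8 := by ring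
  have hg : ((f + 1) * 8 < rows.length ∧ ((rows.drop ((f + 1) * 8)).take 8).sum = 0)
      ↔ (f * 8 < (rows.drop 8).length ∧ (((rows.drop 8).drop (f * 8)).take 8).sum = 0) := by
    rw [List.drop_drop, List.length_drop, harg]
    constructor <;> rintro ⟨hx, hy⟩ <;> exact ⟨by omega, hy⟩
  by_cases hc : (f + 1) * 8 < rows.length ∧ ((rows.drop ((f + 1) * 8)).take 8).sum = 0
  · rw [if_pos hc, if_pos (hg.mp hc)]
    exact pvCountFront_succ rows (f + 1)
  · rw [if_neg hc, if_neg (fun hx => hc (hg.mpr hx))]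
termination_by rows.length - f * 8
decreasing_by have := hc.1; omega

lemma pvCountBack_succ (rows : List Int) (n b : Nat) :
    pvCountBack rows n (b + 1) = pvCountBack (rows.take (n - 8)) (n - 8) b + 1 := by
  conv_lhs => rw [pvCountBack]
  conv_rhs => rw [pvCountBack]
  have harg : n - (b + 1) * 8 = (n - 8) - b * 8 := by omega
  have hsl : ((rows.take (n - 8)).take ((n - 8) - b * 8)) = rows.take (n - (b + 1) * 8) := by
    rw [List.take_take, harg]
    congr 1
    omega
  have hg : ((b + 1) * 8 < n ∧ ((rows.take (n - (b + 1) * 8)).drop (n - (b + 1) * 8 - 8)).sum = 0)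
      ↔ (b * 8 < n - 8 ∧ (((rows.take (n - 8)).take ((n - 8) - b * 8)).drop ((n - 8) - b * 8 - 8)).sum = 0) := by
    rw [hsl, harg]
    constructor <;> rintro ⟨hx, hy⟩ <;> exact ⟨by omega, hy⟩
  by_cases hc : (b + 1) * 8 < n ∧ ((rows.take (n - (b + 1) * 8)).drop (n - (b + 1) * 8 - 8)).sum = 0
  · rw [if_pos hc, if_pos (hg.mp hc)]
    exact pvCountBack_succ rows n (b + 1)
  · rw [if_neg hc, if_neg (fun hx => hc (hg.mpr hx))]
termination_by n - b * 8
decreasing_by have := hc.1; omega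

lemma pvTrimFrontA_eq (char : List (List Int)) :
    pvTrimFrontA char = char.drop (pvCountFront (char.map List.sum) 0 * 8) := by
  conv_lhs => rw [pvTrimFrontA]
  conv_rhs => rw [pvCountFront]
  have hg : (char ≠ [] ∧ pvPsum (char.take 8) = 0)
      ↔ (0 * 8 < (char.map List.sum).length ∧ (((char.map List.sum).drop (0 * 8)).take 8).sum = 0) := by
    simp [pvPsum_eq_map_sum, List.map_take, List.length_pos_iff]
  by_cases hc : char ≠ [] ∧ pvPsum (char.take 8) = 0
  · rw [if_pos hc, if_pos (hg.mp hc)]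
    rw [pvTrimFrontA_eq (char.drop 8)]
    rw [List.map_drop, pvCountFront_succ, List.drop_drop]
    congr 1
    ring
  · rw [if_neg hc, if_neg (fun hx => hc (hg.mpr hx))]
    simp
termination_by char.length
decreasing_by
  have : char.length ≠ 0 := by simpa using List.length_pos_of_ne_nil hc.1 |>.ne'
  simp [List.length_drop]
  omega

lemma pvTrimBackA_eq (char : List (List Int)) :
    pvTrimBackA char = char.take (char.length - pvCountBack (char.map List.sum) char.length 0 * 8) := by
  conv_lhs => rw [pvTrimBackA]
  conv_rhs => rw [pvCountBack]
  have htake : (char.map List.sum).take (char.length - 0 * 8) = char.map List.sum := by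
    apply List.take_of_length_le
    simp
  have hg : (char ≠ [] ∧ pvPsum (char.drop (char.length - 8)) = 0)
      ↔ (0 * 8 < char.length ∧
         (((char.map List.sum).take (char.length - 0 * 8)).drop (char.length - 0 * 8 - 8)).sum = 0) := by
    rw [htake]
    simp [pvPsum_eq_map_sum, List.map_drop, List.length_pos_iff]
  by_cases hc : char ≠ [] ∧ pvPsum (char.drop (char.length - 8)) = 0
  · rw [if_pos hc, if_pos (hg.mp hc)]
    rw [pvTrimBackA_eq (char.take (char.length - 8))]
    rw [List.map_take, List.length_take, Nat.min_eq_left (Nat.sub_le _ _), pvCountBack_succ,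
      List.take_take]
    congr 1
    omega
  · rw [if_neg hc, if_neg (fun hx => hc (hg.mpr hx))]
    simp
termination_by char.length
decreasing_by
  have : char.length ≠ 0 := by simpa using List.length_pos_of_ne_nil hc.1 |>.ne'
  simp [List.length_take]
  omega

-- ===== VERDICT (by name: the statement is the Claim_ definition above) =====
theorem trim_whitespace_py_spec : Claim_equal_trim_whitespace_py := by
  intro char _
  unfold Spec_trim_whitespace_py trim_whitespace_py trim_whitespace_py_alt
  by_cases h : (char.map List.sum).sum ≤ 0
  · rw [if_neg (by rw [pvPsum_eq_map_sum]; omega), if_pos h]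
  · rw [if_pos (by rw [pvPsum_eq_map_sum]; omega), if_neg h]
    rw [pvTrimFrontA_eq, pvTrimBackA_eq, List.map_drop]
    simp only [List.length_drop, List.length_map]
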